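-- pv_equiv track=rewrite | github.com/Harinisri012/Safe_step | utils/Thread.py | navigation_logic
-- ===== SOURCE A (Python) =====
-- def assess_risk(direction, detected_objects):
--     risk_score = 0
--     for obj in detected_objects:
--         obj_position, obj_distance, obj_impact = obj
--         if direction == "left" and obj_position in ["left", "center"]:
--             risk_score += weighted_risk(obj_distance, obj_impact)
--         if direction == "right" and obj_position in ["right", "center"]:
--             risk_score += weighted_risk(obj_distance, obj_impact)
--     return risk_score
--
-- def weighted_risk(distance, impact):
--     if distance == "Very Near":
--         return impact * 3
--     elif distance == "Near":
--         return impact * 2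
--     elif distance == "Far":
--         return impact * 1
--     else:
--         return 0
--
-- def navigation_logic(detected_objects):
--     risk_scores = {"left": 0, "right": 0}
--     for obj_position, obj_distance, obj_impact in detected_objects:
--         if obj_position == "center" and obj_distance == "Very Near":
--             risk_scores["left"] += assess_risk("left", detected_objects)
--             risk_scores["right"] += assess_risk("right", detected_objects)
--             return "Move Left" if risk_scores["left"] < risk_scores["right"] else "Move Right"
--     return "Proceed Forward"
-- ===== SOURCE B (Python) =====
-- def navigation_logic(detected_objects):
--     left_risk = 0
--     right_risk = 0
--     blocked = False
--     for pos, dist, impact in detected_objects: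
--         m = 3 if dist == "Very Near" else 2 if dist == "Near" else 1 if dist == "Far" else 0
--         if pos in ("left", "center"):
--             left_risk += impact * m
--         if pos in ("right", "center"):
--             right_risk += impact * m
--         if pos == "center" and dist == "Very Near":
--             blocked = True
--     if blocked:
--         return "Move Left" if left_risk < right_risk else "Move Right"
--     return "Proceed Forward"
-- ===== Notes on version B (the rewrite author's own statement) =====
-- stated objective: simpler
-- what changed: Replaces the trigger-search loop plus two full assess_risk rescans with a single pass that accumulates both side risks and a blocked flag simultaneously.
import Mathlib
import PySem

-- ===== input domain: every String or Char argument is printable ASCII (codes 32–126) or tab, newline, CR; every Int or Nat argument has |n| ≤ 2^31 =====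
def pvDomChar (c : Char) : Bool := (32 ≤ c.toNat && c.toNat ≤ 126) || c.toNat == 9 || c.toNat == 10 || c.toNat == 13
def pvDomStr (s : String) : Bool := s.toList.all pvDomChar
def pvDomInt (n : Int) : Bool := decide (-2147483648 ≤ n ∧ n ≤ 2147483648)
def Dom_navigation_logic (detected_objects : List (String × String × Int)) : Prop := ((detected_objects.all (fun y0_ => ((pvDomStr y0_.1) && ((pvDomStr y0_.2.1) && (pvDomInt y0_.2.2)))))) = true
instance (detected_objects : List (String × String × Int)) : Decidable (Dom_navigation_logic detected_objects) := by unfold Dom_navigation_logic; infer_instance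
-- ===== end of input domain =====

-- B replaces A's trigger-search loop plus two full assess_risk rescans by one pass that
-- accumulates both side risks and a blocked flag simultaneously (objective: simpler, one traversal).

-- ===== PORT A =====
def weighted_risk (distance : String) (impact : Int) : Int :=
  if distance = "Very Near" then impact * 3
  else if distance = "Near" then impact * 2
  else if distance = "Far" then impact * 1
  else 0

def assess_risk (direction : String) (detected_objects : List (String × String × Int)) : Int :=
  detected_objects.foldl (fun risk_score obj =>
    let obj_position := obj.1
    let obj_distance := obj.2.1
    let obj_impact := obj.2.2
    let risk_score :=
      if direction = "left" ∧ (obj_position = "left" ∨ obj_position = "center") then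
        risk_score + weighted_risk obj_distance obj_impact
      else risk_score
    if direction = "right" ∧ (obj_position = "right" ∨ obj_position = "center") then
      risk_score + weighted_risk obj_distance obj_impact
    else risk_score) 0

-- A's for-loop with its early return, carrying the risk_scores dict and the full list
def navGo (detected_objects : List (String × String × Int))
    (risk_scores : PySem.Dict String Int) :
    List (String × String × Int) → String
  | [] => "Proceed Forward"
  | (obj_position, obj_distance, _) :: rest =>
    if obj_position = "center" ∧ obj_distance = "Very Near" then
      let rs1 := risk_scores.insert "left"
        (risk_scores.getD "left" 0 + assess_risk "left" detected_objects)
      let rs2 := rs1.insert "right"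
        (rs1.getD "right" 0 + assess_risk "right" detected_objects)
      if rs2.getD "left" 0 < rs2.getD "right" 0 then "Move Left" else "Move Right"
    else navGo detected_objects risk_scores rest

def navigation_logic (detected_objects : List (String × String × Int)) : String :=
  let risk_scores : PySem.Dict String Int :=
    (PySem.Dict.empty.insert "left" 0).insert "right" 0
  navGo detected_objects risk_scores detected_objects

-- ===== PORT B =====
def navStep (st : Int × Int × Bool) (obj : String × String × Int) : Int × Int × Bool :=
  let (pos, dist, impact) := obj
  let m : Int := if dist = "Very Near" then 3 else if dist = "Near" then 2
                 else if dist = "Far" then 1 else 0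
  let l := if pos = "left" ∨ pos = "center" then st.1 + impact * m else st.1
  let r := if pos = "right" ∨ pos = "center" then st.2.1 + impact * m else st.2.1
  let b := if pos = "center" ∧ dist = "Very Near" then true else st.2.2
  (l, r, b)

def navigation_logic_alt (detected_objects : List (String × String × Int)) : String :=
  let s := detected_objects.foldl navStep (0, 0, false)
  if s.2.2 then (if s.1 < s.2.1 then "Move Left" else "Move Right")
  else "Proceed Forward"

-- ===== PRECONDITION & SPEC =====
def Spec_navigation_logic (detected_objects : List (String × String × Int)) (out : String) : Prop := out = navigation_logic_alt detected_objects
instance (detected_objects : List (String × String × Int)) (out : String) : Decidable (Spec_navigation_logic detected_objects out) := by unfold Spec_navigation_logic; infer_instance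

-- ===== CLAIM (what is proved, stated in full; the proofs are below) =====
def Claim_equal_navigation_logic : Prop := ∀ (detected_objects : List (String × String × Int)), Dom_navigation_logic detected_objects → Spec_navigation_logic detected_objects (navigation_logic detected_objects)

-- ===== LEMMAS AND PROOFS =====

-- A's trigger test, as a boolean over the list
def hasTrig (xs : List (String × String × Int)) : Bool :=
  xs.any (fun o => o.1 = "center" ∧ o.2.1 = "Very Near")

-- per-object contribution of assess_risk's loop body
def contrib (direction : String) (obj : String × String × Int) : Int :=
  (if direction = "left" ∧ (obj.1 = "left" ∨ obj.1 = "center") then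
    weighted_risk obj.2.1 obj.2.2 else 0) +
  (if direction = "right" ∧ (obj.1 = "right" ∨ obj.1 = "center") then
    weighted_risk obj.2.1 obj.2.2 else 0)

lemma assess_eq_sum (direction : String) (xs : List (String × String × Int)) :
    assess_risk direction xs = (xs.map (contrib direction)).sum := by
  unfold assess_risk
  have h : (fun (risk_score : Int) (obj : String × String × Int) =>
      let obj_position := obj.1
      let obj_distance := obj.2.1
      let obj_impact := obj.2.2
      let risk_score :=
        if direction = "left" ∧ (obj_position = "left" ∨ obj_position = "center") then
          risk_score + weighted_risk obj_distance obj_impact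
        else risk_score
      if direction = "right" ∧ (obj_position = "right" ∨ obj_position = "center") then
        risk_score + weighted_risk obj_distance obj_impact
      else risk_score) =
      fun risk_score obj => risk_score + contrib direction obj := by
    funext acc obj
    simp only [contrib]
    split_ifs <;> ring
  rw [h, PySem.List.foldl_add]
  simp

-- B's fold, characterised: totals are the two assess_risk sums, flag is hasTrig
lemma foldl_navStep (xs : List (String × String × Int)) (l r : Int) (b : Bool) :
    xs.foldl navStep (l, r, b) =
      (l + assess_risk "left" xs, r + assess_risk "right" xs, b || hasTrig xs) := by
  induction xs generalizing l r b with
  | nil => simp [assess_risk, hasTrig]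
  | cons h t ih =>
    obtain ⟨pos, dist, impact⟩ := h
    rw [List.foldl_cons]
    show List.foldl navStep (navStep (l, r, b) (pos, dist, impact)) t = _
    simp only [navStep, ih, assess_eq_sum, List.map_cons, List.sum_cons]
    refine Prod.ext ?_ (Prod.ext ?_ ?_)
    · simp only [contrib, weighted_risk]
      split_ifs <;> simp_all <;> ring
    · simp only [contrib, weighted_risk]
      split_ifs <;> simp_all <;> ring
    · simp only [hasTrig, List.any_cons]
      split_ifs with hc <;> simp [hc]

-- A's loop, characterised
lemma navGo_spec (all : List (String × String × Int)) (xs : List (String × String × Int)) :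
    navGo all ((PySem.Dict.empty.insert "left" 0).insert "right" 0) xs =
      if hasTrig xs then
        (if assess_risk "left" all < assess_risk "right" all then "Move Left" else "Move Right")
      else "Proceed Forward" := by
  induction xs with
  | nil => simp [navGo, hasTrig]
  | cons h t ih =>
    obtain ⟨pos, dist, impact⟩ := h
    by_cases hc : pos = "center" ∧ dist = "Very Near"
    · simp [navGo, hc, hasTrig, PySem.Dict.insert, PySem.Dict.getD, PySem.Dict.get?,
        PySem.Dict.empty]
    · simp only [navGo, if_neg hc, ih, hasTrig, List.any_cons, decide_eq_false hc, Bool.false_or]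
      rfl

-- ===== VERDICT (by name: the statement is the Claim_ definition above) =====
theorem navigation_logic_spec : Claim_equal_navigation_logic := by
  intro objs _
  show navigation_logic objs = navigation_logic_alt objs
  rw [navigation_logic, navigation_logic_alt]
  rw [navGo_spec, foldl_navStep]
  by_cases ht : hasTrig objs = true <;> simp [ht]
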